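-- pv_equiv track=rewrite | github.com/MrLokans/chess-blunder-trainer | blunder_tutor/background/jobs/import_pgn.py | _classify_moves
-- ===== SOURCE A (Python) =====
-- from typing import Any, ClassVar
--
-- _CLASSIFICATION_BLUNDER = 3
--
-- _CLASSIFICATION_MISTAKE = 2
--
-- _CLASSIFICATION_INACCURACY = 1
--
-- def _classify_moves(
--     moves: list[dict[str, Any]],
--     user_side: int | None,
-- ) -> dict[str, int]:
--     user_moves = (
--         [m for m in moves if m["player"] == user_side]
--         if user_side is not None
--         else moves
--     )
--     return {
--         "total_moves": len(user_moves),
--         "blunders": sum(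
--             1 for m in user_moves if m["classification"] == _CLASSIFICATION_BLUNDER
--         ),
--         "mistakes": sum(
--             1 for m in user_moves if m["classification"] == _CLASSIFICATION_MISTAKE
--         ),
--         "inaccuracies": sum(
--             1 for m in user_moves if m["classification"] == _CLASSIFICATION_INACCURACY
--         ),
--     }
-- ===== SOURCE B (Python) =====
-- def _classify_moves(moves, user_side):
--     user_moves = (
--         [m for m in moves if m["player"] == user_side]
--         if user_side is not None
--         else moves
--     )
--     total = blunders = mistakes = inaccuracies = 0
--     for m in user_moves:
--         total += 1
--         c = m["classification"]
--         if c == 3: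
--             blunders += 1
--         elif c == 2:
--             mistakes += 1
--         elif c == 1:
--             inaccuracies += 1
--     return {
--         "total_moves": total,
--         "blunders": blunders,
--         "mistakes": mistakes,
--         "inaccuracies": inaccuracies,
--     }
-- ===== Notes on version B (the rewrite author's own statement) =====
-- stated objective: simpler
-- what changed: Replaces A's four separate scans of user_moves (len plus three generator sums) with one loop maintaining four counters incremented per move via an if/elif chain.
import Mathlib
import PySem

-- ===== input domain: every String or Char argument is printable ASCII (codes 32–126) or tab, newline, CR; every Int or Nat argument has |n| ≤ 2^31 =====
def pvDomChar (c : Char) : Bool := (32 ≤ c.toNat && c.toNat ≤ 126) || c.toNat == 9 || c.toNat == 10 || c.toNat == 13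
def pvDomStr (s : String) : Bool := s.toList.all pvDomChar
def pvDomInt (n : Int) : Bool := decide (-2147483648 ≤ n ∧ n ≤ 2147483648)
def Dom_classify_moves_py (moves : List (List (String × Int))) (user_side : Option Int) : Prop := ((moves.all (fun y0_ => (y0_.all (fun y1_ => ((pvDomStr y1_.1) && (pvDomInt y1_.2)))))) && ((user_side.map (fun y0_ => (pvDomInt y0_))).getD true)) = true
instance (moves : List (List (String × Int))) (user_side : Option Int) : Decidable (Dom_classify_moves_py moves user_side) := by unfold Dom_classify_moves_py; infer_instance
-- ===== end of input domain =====

-- B changes A's four separate scans (len + three generator sums) into one loop with four counters; objective: simpler.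

-- ===== PORT A =====
def classify_moves_py (moves : List (List (String × Int))) (user_side : Option Int) : List (String × Int) :=
  let user_moves :=
    match user_side with
    | some s => moves.filter (fun m => (PySem.Dict.ofList m).get? "player" == some s)
    | none => moves
  [("total_moves", (user_moves.length : Int)),
   ("blunders", user_moves.foldl
      (fun acc m => if (PySem.Dict.ofList m).get? "classification" == some 3 then acc + 1 else acc) (0 : Int)),
   ("mistakes", user_moves.foldl
      (fun acc m => if (PySem.Dict.ofList m).get? "classification" == some 2 then acc + 1 else acc) (0 : Int)),
   ("inaccuracies", user_moves.foldl
      (fun acc m => if (PySem.Dict.ofList m).get? "classification" == some 1 then acc + 1 else acc) (0 : Int))]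

-- ===== PORT B =====
-- loop body of B's single pass: total/blunders/mistakes/inaccuracies counters
def pvStepB (st : Int × Int × Int × Int) (m : List (String × Int)) : Int × Int × Int × Int :=
  let c := (PySem.Dict.ofList m).get? "classification"
  if c == some 3 then (st.1 + 1, st.2.1 + 1, st.2.2.1, st.2.2.2)
  else if c == some 2 then (st.1 + 1, st.2.1, st.2.2.1 + 1, st.2.2.2)
  else if c == some 1 then (st.1 + 1, st.2.1, st.2.2.1, st.2.2.2 + 1)
  else (st.1 + 1, st.2.1, st.2.2.1, st.2.2.2)

def classify_moves_py_alt (moves : List (List (String × Int))) (user_side : Option Int) : List (String × Int) :=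
  let user_moves :=
    match user_side with
    | some s => moves.filter (fun m => (PySem.Dict.ofList m).get? "player" == some s)
    | none => moves
  let st : Int × Int × Int × Int := user_moves.foldl pvStepB (0, 0, 0, 0)
  [("total_moves", st.1), ("blunders", st.2.1), ("mistakes", st.2.2.1), ("inaccuracies", st.2.2.2)]

-- ===== PRECONDITION & SPEC =====
-- Pre_ excludes exactly the inputs where Python A raises KeyError: with a user side, every
-- move needs a "player" key and the user's moves need "classification"; with no user side,
-- every move needs "classification".
def Pre_classify_moves_py (moves : List (List (String × Int))) (user_side : Option Int) : Prop :=
  match user_side with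
  | none => ∀ m ∈ moves, "classification" ∈ m.map Prod.fst
  | some s => ∀ m ∈ moves, "player" ∈ m.map Prod.fst ∧
      ((PySem.Dict.ofList m).get? "player" = some s → "classification" ∈ m.map Prod.fst)
instance (moves : List (List (String × Int))) (user_side : Option Int) : Decidable (Pre_classify_moves_py moves user_side) := by unfold Pre_classify_moves_py; cases user_side <;> infer_instance

def pvWitness_classify_moves_py : (List (List (String × Int))) × Option Int :=
  ([[("player", 0), ("classification", 3)], [("player", 1), ("classification", 2)]], some 0)

def Spec_classify_moves_py (moves : List (List (String × Int))) (user_side : Option Int) (out : List (String × Int)) : Prop := out = classify_moves_py_alt moves user_side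
instance (moves : List (List (String × Int))) (user_side : Option Int) (out : List (String × Int)) : Decidable (Spec_classify_moves_py moves user_side out) := by unfold Spec_classify_moves_py; infer_instance

-- ===== CLAIM (what is proved, stated in full; the proofs are below) =====
def Claim_equal_classify_moves_py : Prop := ∀ (moves : List (List (String × Int))) (user_side : Option Int), Dom_classify_moves_py moves user_side → Pre_classify_moves_py moves user_side → Spec_classify_moves_py moves user_side (classify_moves_py moves user_side)

-- ===== LEMMAS AND PROOFS =====

-- A's generator-sum fold counts the predicate.
theorem foldl_if_count {α : Type} (p : α → Bool) :
    ∀ (l : List α) (a : Int),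
      l.foldl (fun acc x => if p x then acc + 1 else acc) a = a + (l.countP p : Int) := by
  intro l
  induction l with
  | nil => simp
  | cons x xs ih =>
    intro a
    simp only [List.foldl_cons, List.countP_cons, ih]
    by_cases h : p x = true <;> simp [h] <;> ring

-- B's single loop computes the length and the three counts at once.
theorem loop_counts :
    ∀ (l : List (List (String × Int))) (t b m i : Int),
      l.foldl pvStepB (t, b, m, i)
      = (t + (l.length : Int),
         b + (l.countP (fun x => (PySem.Dict.ofList x).get? "classification" == some 3) : Int),
         m + (l.countP (fun x => (PySem.Dict.ofList x).get? "classification" == some 2) : Int),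
         i + (l.countP (fun x => (PySem.Dict.ofList x).get? "classification" == some 1) : Int)) := by
  intro l
  induction l with
  | nil => simp
  | cons x xs ih =>
    intro t b m i
    rw [List.foldl_cons]
    by_cases h3 : (PySem.Dict.ofList x).get? "classification" = some 3
    · rw [show pvStepB (t, b, m, i) x = (t + 1, b + 1, m, i) from by simp [pvStepB, h3], ih]
      simp [h3, Prod.ext_iff]; omega
    · by_cases h2 : (PySem.Dict.ofList x).get? "classification" = some 2
      · rw [show pvStepB (t, b, m, i) x = (t + 1, b, m + 1, i) from by simp [pvStepB, h2], ih]
        simp [h3, h2, Prod.ext_iff]; omega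
      · by_cases h1 : (PySem.Dict.ofList x).get? "classification" = some 1
        · rw [show pvStepB (t, b, m, i) x = (t + 1, b, m, i + 1) from by simp [pvStepB, h1], ih]
          simp [h1, Prod.ext_iff]; omega
        · rw [show pvStepB (t, b, m, i) x = (t + 1, b, m, i) from by simp [pvStepB, h3, h2, h1], ih]
          simp [h3, h2, h1, Prod.ext_iff]; omega

-- ===== VERDICT (by name: the statement is the Claim_ definition above) =====
theorem classify_moves_py_spec : Claim_equal_classify_moves_py := by
  intro moves user_side _ _
  unfold Spec_classify_moves_py classify_moves_py classify_moves_py_alt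
  cases user_side <;> simp only [loop_counts, foldl_if_count, zero_add]
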